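-- pv_equiv track=rewrite | github.com/landron/Problems | hackerrank/python/difficult_maximize_it.py | maxim_powers
-- ===== SOURCE A (Python) =====
-- import itertools
--
-- def maxim_powers(sets, remainder):
--     '''solve the problem: the entries are already normalized (powers, %M)'''
--     sums = set()
--     prev = set({0})
--     for line in sets:
--         sums = set()
--         for j in itertools.product(line, prev):
--             sums.add((j[0]+j[1]) % remainder)
--         prev = sums
--     return max(sums)
-- ===== SOURCE B (Python) =====
-- import itertools
--
-- def maxim_powers(sets, remainder):
--     '''brute force: enumerate every choice of one element per set'''
--     return max(sum(choice) % remainder for choice in itertools.product(*sets))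
-- ===== Notes on version B (the rewrite author's own statement) =====
-- stated objective: simpler
-- what changed: Replaced the residue-set dynamic programming (maintaining the set of reachable sums mod M line by line) with a one-line direct enumeration of all choices via itertools.product, taking the max of sum(choice) % remainder.
import Mathlib
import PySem

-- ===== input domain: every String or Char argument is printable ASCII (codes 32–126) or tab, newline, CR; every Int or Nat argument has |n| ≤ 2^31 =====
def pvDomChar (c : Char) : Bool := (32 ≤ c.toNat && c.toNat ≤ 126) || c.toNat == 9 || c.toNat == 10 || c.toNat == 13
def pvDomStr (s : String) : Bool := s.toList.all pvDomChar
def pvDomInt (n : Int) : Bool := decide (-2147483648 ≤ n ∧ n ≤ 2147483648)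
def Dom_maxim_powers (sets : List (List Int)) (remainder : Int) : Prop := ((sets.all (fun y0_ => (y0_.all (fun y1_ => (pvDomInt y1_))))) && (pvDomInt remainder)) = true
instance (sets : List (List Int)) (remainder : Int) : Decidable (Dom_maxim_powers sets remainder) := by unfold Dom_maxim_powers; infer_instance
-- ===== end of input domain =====

-- B replaces A's residue-set DP by a direct enumeration of every choice of one
-- element per set (itertools.product), taking the max of sum % remainder: simpler, not faster.


-- ===== PORT A =====
-- inner loop of A: sums = set(); for j in itertools.product(line, prev): sums.add((j[0]+j[1]) % remainder)
def pvStepA (remainder : Int) (prev : PySem.Set Int) (line : List Int) : PySem.Set Int :=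
  (line.flatMap (fun x => prev.map (fun p => (x, p)))).foldl
    (fun sums j => PySem.Set.add sums (PySem.Int.mod (j.1 + j.2) remainder)) PySem.Set.empty

def maxim_powers (sets : List (List Int)) (remainder : Int) : Int :=
  -- state = (sums, prev); max() of an empty set raises in Python: those inputs are outside Pre_
  let st := sets.foldl
    (fun (st : PySem.Set Int × PySem.Set Int) line =>
      let sums := pvStepA remainder st.2 line
      (sums, sums))
    ((PySem.Set.empty : PySem.Set Int), PySem.Set.ofList [0])
  (PySem.List.max? st.1 (fun x => x)).getD 0

-- ===== PORT B =====
-- itertools.product(*sets): first list varies slowest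
def pvProduct : List (List Int) → List (List Int)
  | [] => [[]]
  | l :: ls => l.flatMap (fun x => (pvProduct ls).map (fun c => x :: c))

def maxim_powers_alt (sets : List (List Int)) (remainder : Int) : Int :=
  -- max(sum(choice) % remainder for choice in itertools.product(*sets)); empty → ValueError, outside Pre_
  (PySem.List.max? ((pvProduct sets).map (fun c => PySem.Int.mod c.sum remainder)) (fun x => x)).getD 0

-- ===== PRECONDITION & SPEC =====
-- Pre_ excludes exactly the inputs where A raises: sets == [] or some line empty (ValueError
-- from max() of an empty set) and remainder == 0 (ZeroDivisionError). On every such input B also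
-- raises, except sets == [] with remainder != 0, where B returns 0 (max over the single empty choice).
def Pre_maxim_powers (sets : List (List Int)) (remainder : Int) : Prop :=
  sets ≠ [] ∧ remainder ≠ 0 ∧ ∀ l ∈ sets, l ≠ []
instance (sets : List (List Int)) (remainder : Int) : Decidable (Pre_maxim_powers sets remainder) := by
  unfold Pre_maxim_powers; infer_instance
def pvWitness_maxim_powers : List (List Int) × Int := ([[1, 2], [3]], 5)

def Spec_maxim_powers (sets : List (List Int)) (remainder : Int) (out : Int) : Prop := out = maxim_powers_alt sets remainder
instance (sets : List (List Int)) (remainder : Int) (out : Int) : Decidable (Spec_maxim_powers sets remainder out) := by unfold Spec_maxim_powers; infer_instance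

-- ===== CLAIM (what is proved, stated in full; the proofs are below) =====
def Claim_equal_maxim_powers : Prop := ∀ (sets : List (List Int)) (remainder : Int), Dom_maxim_powers sets remainder → Pre_maxim_powers sets remainder → Spec_maxim_powers sets remainder (maxim_powers sets remainder)

-- ===== LEMMAS AND PROOFS =====

-- Python % is Int.fmod; adding an already-reduced summand does not change the residue
theorem pv_mod_add (a b r : Int) :
    PySem.Int.mod (a + PySem.Int.mod b r) r = PySem.Int.mod (a + b) r := by
  show Int.fmod (a + Int.fmod b r) r = Int.fmod (a + b) r
  conv_rhs => rw [show a + b = (a + Int.fmod b r) + r * Int.fdiv b r by rw [Int.fmod_def]; ring]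
  rw [Int.add_mul_fmod_self_left]

theorem pv_mod_idem (b r : Int) :
    PySem.Int.mod (PySem.Int.mod b r) r = PySem.Int.mod b r := by
  have := pv_mod_add 0 b r
  simpa using this

theorem mem_foldl_add {α : Type} (f : α → Int) (ps : List α) (s : PySem.Set Int) (v : Int) :
    v ∈ ps.foldl (fun s j => PySem.Set.add s (f j)) s ↔ v ∈ s ∨ ∃ j ∈ ps, v = f j := by
  induction ps generalizing s with
  | nil => simp
  | cons p ps ih =>
    simp only [List.foldl_cons, ih, PySem.Set.mem_add, List.mem_cons]
    constructor
    · rintro ((h | h) | ⟨j, hj, hv⟩)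
      · exact Or.inl h
      · exact Or.inr ⟨p, Or.inl rfl, h⟩
      · exact Or.inr ⟨j, Or.inr hj, hv⟩
    · rintro (h | ⟨j, (rfl | hj), hv⟩)
      · exact Or.inl (Or.inl h)
      · exact Or.inl (Or.inr hv)
      · exact Or.inr ⟨j, hj, hv⟩

theorem mem_stepA (r : Int) (prev : PySem.Set Int) (line : List Int) (v : Int) :
    v ∈ pvStepA r prev line ↔ ∃ x ∈ line, ∃ p ∈ prev, v = PySem.Int.mod (x + p) r := by
  unfold pvStepA
  refine Iff.trans (mem_foldl_add (fun j : Int × Int => PySem.Int.mod (j.1 + j.2) r) _ _ _) ?_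
  simp only [PySem.Set.empty, List.not_mem_nil, false_or, List.mem_flatMap, List.mem_map]
  constructor
  · rintro ⟨j, ⟨x, hx, p, hp, rfl⟩, rfl⟩
    exact ⟨x, hx, p, hp, rfl⟩
  · rintro ⟨x, hx, p, hp, rfl⟩
    exact ⟨(x, p), ⟨x, hx, p, hp, rfl⟩, rfl⟩

theorem stepA_reduced (r : Int) (prev : PySem.Set Int) (line : List Int) :
    ∀ v ∈ pvStepA r prev line, PySem.Int.mod v r = v := by
  intro v hv
  rcases (mem_stepA r prev line v).1 hv with ⟨x, _, p, _, rfl⟩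
  exact pv_mod_idem _ _

theorem mem_loop (r : Int) (lines : List (List Int)) (prev : PySem.Set Int)
    (hred : ∀ p ∈ prev, PySem.Int.mod p r = p) (v : Int) :
    v ∈ lines.foldl (pvStepA r) prev ↔
      ∃ c ∈ pvProduct lines, ∃ p ∈ prev, v = PySem.Int.mod (c.sum + p) r := by
  induction lines generalizing prev with
  | nil =>
    simp only [List.foldl_nil, pvProduct, List.mem_singleton]
    constructor
    · intro hv
      exact ⟨[], rfl, v, hv, by simpa using (hred v hv).symm⟩
    · rintro ⟨c, rfl, p, hp, rfl⟩
      simpa [hred p hp] using hp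
  | cons l ls ih =>
    rw [List.foldl_cons, ih _ (stepA_reduced r prev l)]
    constructor
    · rintro ⟨c', hc', q, hq, rfl⟩
      rcases (mem_stepA r prev l q).1 hq with ⟨x, hx, p, hp, rfl⟩
      refine ⟨x :: c', ?_, p, hp, ?_⟩
      · simp only [pvProduct, List.mem_flatMap, List.mem_map]
        exact ⟨x, hx, c', hc', rfl⟩
      · rw [pv_mod_add]
        congr 1
        simp [List.sum_cons]; ring
    · rintro ⟨c, hc, p, hp, rfl⟩
      simp only [pvProduct, List.mem_flatMap, List.mem_map] at hc
      rcases hc with ⟨x, hx, c', hc', rfl⟩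
      refine ⟨c', hc', PySem.Int.mod (x + p) r, (mem_stepA r prev l _).2 ⟨x, hx, p, hp, rfl⟩, ?_⟩
      rw [pv_mod_add]
      congr 1
      simp [List.sum_cons]; ring

theorem pvProduct_ne_nil (lines : List (List Int)) (h : ∀ l ∈ lines, l ≠ []) :
    pvProduct lines ≠ [] := by
  induction lines with
  | nil => simp [pvProduct]
  | cons l ls ih =>
    have hl : l ≠ [] := h l (List.mem_cons_self ..)
    have hls : pvProduct ls ≠ [] := ih (fun x hx => h x (List.mem_cons_of_mem _ hx))
    rcases List.exists_mem_of_ne_nil _ hl with ⟨x, hx⟩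
    rcases List.exists_mem_of_ne_nil _ hls with ⟨c, hc⟩
    intro hnil
    have : (x :: c) ∈ pvProduct (l :: ls) := by
      simp only [pvProduct, List.mem_flatMap, List.mem_map]
      exact ⟨x, hx, c, hc, rfl⟩
    simp [hnil] at this

-- the pair state of A's loop: second component is the plain fold, components agree once a line ran
theorem loopA_snd (r : Int) (lines : List (List Int)) (st : PySem.Set Int × PySem.Set Int) :
    (lines.foldl (fun st line => let s := pvStepA r st.2 line; (s, s)) st).2 =
      lines.foldl (pvStepA r) st.2 := by
  induction lines generalizing st with
  | nil => rfl
  | cons l ls ih => simp [List.foldl_cons, ih]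

theorem loopA_fst_eq_snd (r : Int) (lines : List (List Int)) (st : PySem.Set Int × PySem.Set Int)
    (h : lines ≠ [] ∨ st.1 = st.2) :
    (lines.foldl (fun st line => let s := pvStepA r st.2 line; (s, s)) st).1 =
      (lines.foldl (fun st line => let s := pvStepA r st.2 line; (s, s)) st).2 := by
  induction lines generalizing st with
  | nil => simpa using h.resolve_left (by simp)
  | cons l ls ih => exact ih _ (by by_cases hls : ls = [] <;> simp [hls])

theorem maxD_eq_of_mem_iff (xs ys : List Int) (hx : xs ≠ []) (hy : ys ≠ [])
    (h : ∀ v, v ∈ xs ↔ v ∈ ys) :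
    (PySem.List.max? xs (fun x => x)).getD 0 = (PySem.List.max? ys (fun x => x)).getD 0 := by
  rcases Option.ne_none_iff_exists'.1 (fun hn => hx ((PySem.List.max?_eq_none_iff xs (fun x : Int => x)).1 hn))
    with ⟨m, hm⟩
  rcases Option.ne_none_iff_exists'.1 (fun hn => hy ((PySem.List.max?_eq_none_iff ys (fun x : Int => x)).1 hn))
    with ⟨m', hm'⟩
  have h1 : m ≤ m' := PySem.List.max?_isMax hm' m ((h m).1 (PySem.List.max?_mem hm))
  have h2 : m' ≤ m := PySem.List.max?_isMax hm m' ((h m').2 (PySem.List.max?_mem hm'))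
  rw [hm, hm', le_antisymm h1 h2]

-- ===== VERDICT (by name: the statement is the Claim_ definition above) =====
theorem maxim_powers_spec : Claim_equal_maxim_powers := by
  intro sets r _hdom ⟨hne, _hr, hlines⟩
  unfold Spec_maxim_powers maxim_powers maxim_powers_alt
  have hfst :
      (sets.foldl (fun st line => let s := pvStepA r st.2 line; (s, s))
        ((PySem.Set.empty : PySem.Set Int), PySem.Set.ofList [0])).1 =
      sets.foldl (pvStepA r) (PySem.Set.ofList [0]) := by
    rw [loopA_fst_eq_snd r sets _ (Or.inl hne), loopA_snd]
  simp only [hfst]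
  have hred : ∀ p ∈ PySem.Set.ofList [(0 : Int)], PySem.Int.mod p r = p := by
    intro p hp
    simp only [PySem.Set.mem_ofList, List.mem_singleton] at hp
    subst hp
    show Int.fmod 0 r = 0
    simp
  have hmem : ∀ v, v ∈ sets.foldl (pvStepA r) (PySem.Set.ofList [0]) ↔
      v ∈ (pvProduct sets).map (fun c => PySem.Int.mod c.sum r) := by
    intro v
    rw [mem_loop r sets _ hred]
    simp only [List.mem_map]
    constructor
    · rintro ⟨c, hc, p, hp, rfl⟩
      simp only [PySem.Set.mem_ofList, List.mem_singleton] at hp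
      subst hp
      exact ⟨c, hc, by simp⟩
    · rintro ⟨c, hc, rfl⟩
      exact ⟨c, hc, 0, by simp [PySem.Set.mem_ofList], by simp⟩
  have hpne := pvProduct_ne_nil sets hlines
  have hAne : sets.foldl (pvStepA r) (PySem.Set.ofList [0]) ≠ [] := by
    rcases List.exists_mem_of_ne_nil _ hpne with ⟨c, hc⟩
    intro hnil
    have := (hmem (PySem.Int.mod c.sum r)).2 (List.mem_map.2 ⟨c, hc, rfl⟩)
    simp [hnil] at this
  exact maxD_eq_of_mem_iff _ _ hAne (by simpa using hpne) hmem
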